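-- pv_equiv track=rewrite | github.com/dvtrunggg/Graph | Thực Hành/Graph/graph.py | livingOnTheRoads
-- ===== SOURCE A (Python) =====
-- def livingOnTheRoads(roadRegister):
--     adj = []
--     l = len(roadRegister)
--
--     for i in range(l):
--         for j in range(l):
--             if roadRegister[i][j] == True and [j, i] not in adj:
--                 adj.append([i, j])
--
--     adj_len = len(adj)
--     arr = [[False for i in range(adj_len)] for j in range(adj_len)]
--
--     for i in range(adj_len):
--         for j in range(adj_len):
--             if i != j:
--                 # 0 = [0, 1]
--                 # 1 = [0, 1]
--
--                 dSource = adj[i]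
--                 dDest = adj[j]
--
--                 x1 = dSource[0]
--                 x2 = dSource[1]
--
--                 y1 = dDest[0]
--                 y2 = dDest[1]
--
--                 check = False
--                 if x1 == y1 or x1 == y2 or x2 == y1 or x2 == y2:
--                     check = True;
--
--                 arr[i][j] = check
--
--     return arr
-- ===== SOURCE B (Python) =====
-- def livingOnTheRoads(roadRegister):
--     # Phase 1 (same as A): build the deduplicated edge list.
--     adj = []
--     l = len(roadRegister)
--     for i in range(l):
--         for j in range(l):
--             if roadRegister[i][j] == True and [j, i] not in adj:
--                 adj.append([i, j])
--
--     n = len(adj)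
--     # Phase 2: inverted index vertex -> incident edge indices, instead of
--     # comparing every pair of edges endpoint-by-endpoint.
--     inc = {}
--     for k in range(n):
--         e = adj[k]
--         u, v = e[0], e[1]
--         inc.setdefault(u, []).append(k)
--         if v != u:
--             inc.setdefault(v, []).append(k)
--
--     out = []
--     for i in range(n):
--         e = adj[i]
--         u, v = e[0], e[1]
--         mates_u = inc.get(u, [])
--         mates_v = inc.get(v, [])
--         out.append([j != i and (j in mates_u or j in mates_v) for j in range(n)])
--     return out
-- ===== Notes on version B (the rewrite author's own statement) =====
-- stated objective: alternative
-- what changed: Phase 2 replaces the all-pairs endpoint-by-endpoint comparison of edges with an inverted index (a dict mapping each vertex to its incident edge indices) built in one pass; each matrix row is then produced directly by membership in the two incidence lists of that edge's endpoints.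
import Mathlib
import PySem

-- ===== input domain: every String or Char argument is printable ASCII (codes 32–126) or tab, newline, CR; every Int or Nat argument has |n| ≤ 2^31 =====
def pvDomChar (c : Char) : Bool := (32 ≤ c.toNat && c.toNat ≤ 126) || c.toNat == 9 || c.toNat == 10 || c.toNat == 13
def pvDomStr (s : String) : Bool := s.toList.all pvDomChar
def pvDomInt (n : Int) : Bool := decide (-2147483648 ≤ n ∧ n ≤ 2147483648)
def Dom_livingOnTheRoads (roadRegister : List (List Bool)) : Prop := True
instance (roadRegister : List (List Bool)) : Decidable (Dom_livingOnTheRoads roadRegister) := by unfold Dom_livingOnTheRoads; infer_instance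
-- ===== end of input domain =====

-- B keeps A's phase 1 (edge-list building) and replaces the all-pairs endpoint comparison of
-- phase 2 with an inverted index vertex → incident edge indices (objective: alternative).

-- ===== PORT A =====
-- shared phase 1: both Source A and Source B build adj by the identical loop, so both ports use this
-- helper (pyGetD is exact here: Pre_ guarantees roadRegister[i][j] is in range).
def pvBuildAdj (roadRegister : List (List Bool)) : List (List Int) :=
  let l : Int := (roadRegister.length : Int)
  (PySem.List.pyRange 0 l).foldl (fun adj i =>
    (PySem.List.pyRange 0 l).foldl (fun adj j =>
      if (PySem.List.pyGetD (PySem.List.pyGetD roadRegister i []) j false) == true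
          && !(adj.contains [j, i])
      then adj ++ [[i, j]] else adj) adj) []

-- arr[i][j] = b  (the Option-returning steps never fail here: 0 ≤ i,j < len)
def pvStore (arr : List (List Bool)) (i j : Int) (b : Bool) : List (List Bool) :=
  ((PySem.List.pyGet? arr i).bind (fun row =>
    (PySem.List.pySet? row j b).bind (fun row' =>
      PySem.List.pySet? arr i row'))).getD arr

def livingOnTheRoads (roadRegister : List (List Bool)) : List (List Bool) :=
  let adj := pvBuildAdj roadRegister
  let n : Int := (adj.length : Int)
  let arr0 := (PySem.List.pyRange 0 n).map (fun _ => (PySem.List.pyRange 0 n).map (fun _ => false))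
  (PySem.List.pyRange 0 n).foldl (fun arr i =>
    (PySem.List.pyRange 0 n).foldl (fun arr j =>
      if i ≠ j then
        let dSource := PySem.List.pyGetD adj i []
        let dDest := PySem.List.pyGetD adj j []
        let x1 := PySem.List.pyGetD dSource 0 0
        let x2 := PySem.List.pyGetD dSource 1 0
        let y1 := PySem.List.pyGetD dDest 0 0
        let y2 := PySem.List.pyGetD dDest 1 0
        let check := if x1 == y1 || x1 == y2 || x2 == y1 || x2 == y2 then true else false
        pvStore arr i j check
      else arr) arr) arr0

-- ===== PORT B =====
def livingOnTheRoads_alt (roadRegister : List (List Bool)) : List (List Bool) :=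
  let adj := pvBuildAdj roadRegister
  let n : Int := (adj.length : Int)
  let inc : PySem.Dict Int (List Int) :=
    (PySem.List.pyRange 0 n).foldl (fun inc k =>
      let e := PySem.List.pyGetD adj k []
      let u := PySem.List.pyGetD e 0 0
      let v := PySem.List.pyGetD e 1 0
      -- inc.setdefault(u, []).append(k) = overwrite-in-place insert of the extended list
      let inc := inc.insert u (inc.getD u [] ++ [k])
      if v ≠ u then inc.insert v (inc.getD v [] ++ [k]) else inc) PySem.Dict.empty
  (PySem.List.pyRange 0 n).foldl (fun out i =>
    let e := PySem.List.pyGetD adj i []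
    let u := PySem.List.pyGetD e 0 0
    let v := PySem.List.pyGetD e 1 0
    let mu := inc.getD u []
    let mv := inc.getD v []
    out ++ [(PySem.List.pyRange 0 n).map (fun j =>
      (j != i) && (mu.contains j || mv.contains j))]) []

-- ===== PRECONDITION & SPEC =====
-- Pre_ excludes exactly the inputs where A raises IndexError: some row shorter than the matrix.
def Pre_livingOnTheRoads (roadRegister : List (List Bool)) : Prop :=
  ∀ row ∈ roadRegister, roadRegister.length ≤ row.length
instance (roadRegister : List (List Bool)) : Decidable (Pre_livingOnTheRoads roadRegister) := by
  unfold Pre_livingOnTheRoads; infer_instance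
def pvWitness_livingOnTheRoads : List (List Bool) := [[true, false], [true, true]]

def Spec_livingOnTheRoads (roadRegister : List (List Bool)) (out : List (List Bool)) : Prop := out = livingOnTheRoads_alt roadRegister
instance (roadRegister : List (List Bool)) (out : List (List Bool)) : Decidable (Spec_livingOnTheRoads roadRegister out) := by unfold Spec_livingOnTheRoads; infer_instance

-- ===== CLAIM (what is proved, stated in full; the proofs are below) =====
def Claim_equal_livingOnTheRoads : Prop := ∀ (roadRegister : List (List Bool)), Dom_livingOnTheRoads roadRegister → Pre_livingOnTheRoads roadRegister → Spec_livingOnTheRoads roadRegister (livingOnTheRoads roadRegister)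

-- ===== LEMMAS AND PROOFS =====

def pvMat (n : ℕ) (g : ℕ → ℕ → Bool) : List (List Bool) :=
  (List.range n).map (fun i => (List.range n).map (g i))
def pvU (adj : List (List Int)) (k : ℕ) : Int := PySem.List.pyGetD (adj.getD k []) 0 0
def pvV (adj : List (List Int)) (k : ℕ) : Int := PySem.List.pyGetD (adj.getD k []) 1 0
def pvShare (adj : List (List Int)) (a b : ℕ) : Bool :=
  (pvU adj a == pvU adj b) || (pvU adj a == pvV adj b)
    || (pvV adj a == pvU adj b) || (pvV adj a == pvV adj b)
def pvTarget (adj : List (List Int)) : List (List Bool) :=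
  pvMat adj.length (fun i j => if j = i then false else pvShare adj i j)
theorem pvIfBool (b : Bool) : (if b then true else false) = b := by cases b <;> simp

theorem pvMat_congr {n : ℕ} {g h : ℕ → ℕ → Bool}
    (H : ∀ i j, i < n → j < n → g i j = h i j) : pvMat n g = pvMat n h := by
  unfold pvMat
  refine List.map_congr_left (fun i hi => ?_)
  refine List.map_congr_left (fun j hj => ?_)
  exact H i j (List.mem_range.mp hi) (List.mem_range.mp hj)

theorem pvStore_mat {n m t : ℕ} (hm : m < n) (ht : t < n) (g : ℕ → ℕ → Bool) (b : Bool) :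
    pvStore (pvMat n g) (↑m) (↑t) b
      = pvMat n (fun i j => if i = m ∧ j = t then b else g i j) := by
  have h1 : PySem.List.pyGet? (pvMat n g) (↑m) = some ((List.range n).map (g m)) := by
    rw [PySem.List.pyGet?_natCast]
    simp [pvMat, hm]
  have h2 : PySem.List.pySet? ((List.range n).map (g m)) (↑t) b
      = some (((List.range n).map (g m)).set t b) := by
    rw [PySem.List.pySet?_natCast _ _ _ (by simpa using ht)]
  have h3 : PySem.List.pySet? (pvMat n g) (↑m) (((List.range n).map (g m)).set t b)
      = some ((pvMat n g).set m (((List.range n).map (g m)).set t b)) := by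
    rw [PySem.List.pySet?_natCast _ _ _ (by simp [pvMat, hm])]
  unfold pvStore
  rw [h1, Option.bind_some, h2, Option.bind_some, h3, Option.getD_some]
  apply List.ext_getElem
  · simp [pvMat]
  intro i h1' h2'
  have hi : i < n := by simpa [pvMat] using h2'
  rw [List.getElem_set]
  by_cases him : m = i
  · subst him
    simp only [if_true, pvMat, List.getElem_map, List.getElem_range]
    apply List.ext_getElem
    · simp
    intro j h3' h4'
    have hj : j < n := by simpa using h4'
    rw [List.getElem_set]
    simp only [List.getElem_map, List.getElem_range]
    by_cases hjt : t = j
    · subst hjt; simp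
    · have hj2 : ¬ j = t := fun h => hjt h.symm
      simp [hjt, hj2]
  · simp only [if_neg him, pvMat, List.getElem_map, List.getElem_range]
    refine List.map_congr_left (fun j hj => ?_)
    have : ¬ (i = m ∧ j = t) := fun h => him h.1.symm
    simp [this]

theorem pvInnerA (adj : List (List Int)) (m : ℕ) (hm : m < adj.length)
    (g : ℕ → ℕ → Bool) :
    ∀ t, t ≤ adj.length →
      List.foldl (fun arr (j : ℕ) =>
        if (↑m : ℤ) ≠ (↑j : ℤ) then
          pvStore arr (↑m) (↑j)
            (if (PySem.List.pyGetD (PySem.List.pyGetD adj (↑m) []) 0 0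
                    == PySem.List.pyGetD (PySem.List.pyGetD adj (↑j) []) 0 0
                  || PySem.List.pyGetD (PySem.List.pyGetD adj (↑m) []) 0 0
                    == PySem.List.pyGetD (PySem.List.pyGetD adj (↑j) []) 1 0
                  || PySem.List.pyGetD (PySem.List.pyGetD adj (↑m) []) 1 0
                    == PySem.List.pyGetD (PySem.List.pyGetD adj (↑j) []) 0 0
                  || PySem.List.pyGetD (PySem.List.pyGetD adj (↑m) []) 1 0
                    == PySem.List.pyGetD (PySem.List.pyGetD adj (↑j) []) 1 0)
             then true else false)
        else arr)
        (pvMat adj.length g)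
        (List.range t)
      = pvMat adj.length
          (fun i j => if i = m ∧ j < t ∧ j ≠ m then pvShare adj m j else g i j) := by
  intro t
  induction t with
  | zero =>
      intro _
      simp only [List.range_zero, List.foldl_nil]
      exact pvMat_congr (fun i j _ _ => by simp)
  | succ t ih =>
      intro ht1
      have ht : t < adj.length := ht1
      rw [List.range_succ, List.foldl_append]
      rw [ih (le_of_lt ht)]
      simp only [List.foldl_cons, List.foldl_nil]
      by_cases hmt : m = t
      · subst hmt
        rw [if_neg (by simp)]
        refine pvMat_congr (fun i j _ _ => ?_)
        have hcond : (i = m ∧ j < m ∧ j ≠ m) ↔ (i = m ∧ j < m + 1 ∧ j ≠ m) := by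
          constructor <;> rintro ⟨a, b, c⟩ <;> exact ⟨a, by omega, c⟩
        simp only [hcond]
      · rw [if_pos (by exact_mod_cast hmt)]
        rw [pvIfBool]
        have hcheck : (PySem.List.pyGetD (PySem.List.pyGetD adj (↑m : ℤ) []) 0 0
                    == PySem.List.pyGetD (PySem.List.pyGetD adj (↑t : ℤ) []) 0 0
                  || PySem.List.pyGetD (PySem.List.pyGetD adj (↑m : ℤ) []) 0 0
                    == PySem.List.pyGetD (PySem.List.pyGetD adj (↑t : ℤ) []) 1 0
                  || PySem.List.pyGetD (PySem.List.pyGetD adj (↑m : ℤ) []) 1 0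
                    == PySem.List.pyGetD (PySem.List.pyGetD adj (↑t : ℤ) []) 0 0
                  || PySem.List.pyGetD (PySem.List.pyGetD adj (↑m : ℤ) []) 1 0
                    == PySem.List.pyGetD (PySem.List.pyGetD adj (↑t : ℤ) []) 1 0)
              = pvShare adj m t := by
          simp only [pvShare, pvU, pvV, PySem.List.pyGetD_natCast]
        rw [hcheck, pvStore_mat hm ht]
        refine pvMat_congr (fun i j _ _ => ?_)
        by_cases h1 : i = m
        · by_cases h2 : j = t
          · rw [if_pos ⟨h1, h2⟩, if_pos ⟨h1, by omega, by rw [h2]; exact fun h => hmt h.symm⟩]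
            rw [h2]
          · rw [if_neg (fun h => h2 h.2)]
            have hcond : (i = m ∧ j < t ∧ j ≠ m) ↔ (i = m ∧ j < t + 1 ∧ j ≠ m) := by
              constructor <;> rintro ⟨a, b, c⟩
              · exact ⟨a, by omega, c⟩
              · exact ⟨a, by omega, c⟩
            simp only [hcond]
        · rw [if_neg (fun h => h1 h.1), if_neg (fun h => h1 h.1), if_neg (fun h => h1 h.1)]

theorem pvOuterA (adj : List (List Int)) :
    ∀ s, s ≤ adj.length →
      List.foldl (fun arr (i : ℕ) =>
        List.foldl (fun arr (j : ℕ) =>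
          if (↑i : ℤ) ≠ (↑j : ℤ) then
            pvStore arr (↑i) (↑j)
              (if (PySem.List.pyGetD (PySem.List.pyGetD adj (↑i) []) 0 0
                      == PySem.List.pyGetD (PySem.List.pyGetD adj (↑j) []) 0 0
                    || PySem.List.pyGetD (PySem.List.pyGetD adj (↑i) []) 0 0
                      == PySem.List.pyGetD (PySem.List.pyGetD adj (↑j) []) 1 0
                    || PySem.List.pyGetD (PySem.List.pyGetD adj (↑i) []) 1 0
                      == PySem.List.pyGetD (PySem.List.pyGetD adj (↑j) []) 0 0
                    || PySem.List.pyGetD (PySem.List.pyGetD adj (↑i) []) 1 0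
                      == PySem.List.pyGetD (PySem.List.pyGetD adj (↑j) []) 1 0)
               then true else false)
          else arr)
          arr (List.range adj.length))
        (pvMat adj.length (fun _ _ => false)) (List.range s)
      = pvMat adj.length
          (fun i j => if i < s ∧ j ≠ i then pvShare adj i j else false) := by
  intro s
  induction s with
  | zero =>
      intro _
      simp only [List.range_zero, List.foldl_nil]
      exact pvMat_congr (fun i j _ _ => by simp)
  | succ s ih =>
      intro hs1
      have hs : s < adj.length := hs1
      rw [List.range_succ, List.foldl_append, ih (le_of_lt hs)]
      simp only [List.foldl_cons, List.foldl_nil]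
      rw [pvInnerA adj s hs _ adj.length le_rfl]
      refine pvMat_congr (fun i j hi hj => ?_)
      by_cases h1 : i = s
      · by_cases h2 : j = i
        · rw [if_neg (by rintro ⟨-, -, c⟩; exact c (h2.trans h1)),
              if_neg (by rintro ⟨-, c⟩; exact c h2),
              if_neg (by rintro ⟨-, c⟩; exact c h2)]
        · rw [if_pos ⟨h1, hj, fun h => h2 (h.trans h1.symm)⟩,
              if_pos ⟨by omega, h2⟩, h1]
      · by_cases h2 : i < s
        · rw [if_neg (by rintro ⟨a, -⟩; exact h1 a)]
          have hcond : (i < s ∧ j ≠ i) ↔ (i < s + 1 ∧ j ≠ i) := by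
            constructor <;> rintro ⟨a, c⟩
            · exact ⟨by omega, c⟩
            · exact ⟨h2, c⟩
          simp only [hcond]
        · rw [if_neg (by rintro ⟨a, -⟩; exact h1 a),
              if_neg (by rintro ⟨a, -⟩; exact h2 a),
              if_neg (by rintro ⟨a, -⟩; omega)]

theorem pvIncMem (adj : List (List Int)) :
    ∀ t, t ≤ adj.length → ∀ (w j : ℤ),
      (j ∈ (List.foldl (fun (inc : PySem.Dict ℤ (List ℤ)) (k : ℕ) =>
          if PySem.List.pyGetD (PySem.List.pyGetD adj (↑k) []) 1 0
              ≠ PySem.List.pyGetD (PySem.List.pyGetD adj (↑k) []) 0 0 then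
            (inc.insert (PySem.List.pyGetD (PySem.List.pyGetD adj (↑k) []) 0 0)
              (inc.getD (PySem.List.pyGetD (PySem.List.pyGetD adj (↑k) []) 0 0) [] ++ [(↑k : ℤ)])).insert
              (PySem.List.pyGetD (PySem.List.pyGetD adj (↑k) []) 1 0)
              ((inc.insert (PySem.List.pyGetD (PySem.List.pyGetD adj (↑k) []) 0 0)
                (inc.getD (PySem.List.pyGetD (PySem.List.pyGetD adj (↑k) []) 0 0) [] ++ [(↑k : ℤ)])).getD
                (PySem.List.pyGetD (PySem.List.pyGetD adj (↑k) []) 1 0) [] ++ [(↑k : ℤ)])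
          else
            inc.insert (PySem.List.pyGetD (PySem.List.pyGetD adj (↑k) []) 0 0)
              (inc.getD (PySem.List.pyGetD (PySem.List.pyGetD adj (↑k) []) 0 0) [] ++ [(↑k : ℤ)]))
          PySem.Dict.empty (List.range t)).getD w [])
      ↔ ∃ k, k < t ∧ j = (k : ℤ) ∧ (pvU adj k = w ∨ pvV adj k = w) := by
  intro t
  induction t with
  | zero =>
      intro _ w j
      simp [PySem.Dict.getD_empty]
  | succ t ih =>
      intro ht1 w j
      have ht : t < adj.length := ht1
      rw [List.range_succ, List.foldl_append]
      simp only [List.foldl_cons, List.foldl_nil]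
      have hU : PySem.List.pyGetD (PySem.List.pyGetD adj (↑t : ℤ) []) 0 0 = pvU adj t := by
        simp [pvU, PySem.List.pyGetD_natCast]
      have hV : PySem.List.pyGetD (PySem.List.pyGetD adj (↑t : ℤ) []) 1 0 = pvV adj t := by
        simp [pvV, PySem.List.pyGetD_natCast]
      rw [hU, hV]
      by_cases hvu : pvV adj t = pvU adj t
      · rw [if_neg (by simp [hvu])]
        rw [PySem.Dict.getD_insert]
        by_cases hw : w = pvU adj t
        · subst hw
          rw [if_pos rfl]
          simp only [List.mem_append, List.mem_singleton]
          rw [ih (le_of_lt ht)]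
          constructor
          · rintro (⟨k, hk, rfl, hk2⟩ | rfl)
            · exact ⟨k, by omega, rfl, hk2⟩
            · exact ⟨t, by omega, rfl, Or.inl rfl⟩
          · rintro ⟨k, hk, rfl, hk2⟩
            by_cases hkt : k = t
            · subst hkt; exact Or.inr rfl
            · exact Or.inl ⟨k, by omega, rfl, hk2⟩
        · rw [if_neg hw]
          rw [ih (le_of_lt ht)]
          constructor
          · rintro ⟨k, hk, rfl, hk2⟩
            exact ⟨k, by omega, rfl, hk2⟩
          · rintro ⟨k, hk, rfl, hk2⟩
            by_cases hkt : k = t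
            · subst hkt
              rcases hk2 with h | h
              · exact absurd h.symm hw
              · rw [hvu] at h; exact absurd h.symm hw
            · exact ⟨k, by omega, rfl, hk2⟩
      · rw [if_pos hvu]
        rw [PySem.Dict.getD_insert]
        by_cases hw1 : w = pvV adj t
        · subst hw1
          rw [if_pos rfl]
          rw [PySem.Dict.getD_insert, if_neg hvu]
          simp only [List.mem_append, List.mem_singleton]
          rw [ih (le_of_lt ht)]
          constructor
          · rintro (⟨k, hk, rfl, hk2⟩ | rfl)
            · exact ⟨k, by omega, rfl, hk2⟩
            · exact ⟨t, by omega, rfl, Or.inr rfl⟩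
          · rintro ⟨k, hk, rfl, hk2⟩
            by_cases hkt : k = t
            · subst hkt
              rcases hk2 with h | h
              · exact absurd h.symm hvu
              · exact Or.inr rfl
            · exact Or.inl ⟨k, by omega, rfl, hk2⟩
        · rw [if_neg hw1]
          rw [PySem.Dict.getD_insert]
          by_cases hw2 : w = pvU adj t
          · subst hw2
            rw [if_pos rfl]
            simp only [List.mem_append, List.mem_singleton]
            rw [ih (le_of_lt ht)]
            constructor
            · rintro (⟨k, hk, rfl, hk2⟩ | rfl)
              · exact ⟨k, by omega, rfl, hk2⟩
              · exact ⟨t, by omega, rfl, Or.inl rfl⟩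
            · rintro ⟨k, hk, rfl, hk2⟩
              by_cases hkt : k = t
              · subst hkt
                rcases hk2 with h | h
                · exact Or.inr rfl
                · exact absurd h hvu
              · exact Or.inl ⟨k, by omega, rfl, hk2⟩
          · rw [if_neg hw2]
            rw [ih (le_of_lt ht)]
            constructor
            · rintro ⟨k, hk, rfl, hk2⟩
              exact ⟨k, by omega, rfl, hk2⟩
            · rintro ⟨k, hk, rfl, hk2⟩
              by_cases hkt : k = t
              · subst hkt
                rcases hk2 with h | h
                · exact absurd h.symm hw2
                · exact absurd h.symm hw1
              · exact ⟨k, by omega, rfl, hk2⟩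

theorem pvPhase2B (adj : List (List Int)) (inc : PySem.Dict ℤ (List ℤ))
    (hinc : ∀ (w j : ℤ), (j ∈ inc.getD w []) ↔
      ∃ k, k < adj.length ∧ j = (k : ℤ) ∧ (pvU adj k = w ∨ pvV adj k = w)) :
    List.foldl (fun out (i : ℕ) => out ++
      [(List.range adj.length).map (fun j : ℕ =>
        ((↑j : ℤ) != (↑i : ℤ))
          && ((inc.getD (PySem.List.pyGetD (PySem.List.pyGetD adj (↑i) []) 0 0) []).contains (↑j)
            || (inc.getD (PySem.List.pyGetD (PySem.List.pyGetD adj (↑i) []) 1 0) []).contains (↑j)))])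
      [] (List.range adj.length)
    = pvTarget adj := by
  rw [PySem.List.foldl_append_singleton_eq_map]
  rw [List.nil_append]
  unfold pvTarget pvMat
  refine List.map_congr_left (fun i hi => ?_)
  have hi' : i < adj.length := List.mem_range.mp hi
  refine List.map_congr_left (fun j hj => ?_)
  have hj' : j < adj.length := List.mem_range.mp hj
  have hU : PySem.List.pyGetD (PySem.List.pyGetD adj (↑i : ℤ) []) 0 0 = pvU adj i := by
    simp [pvU, PySem.List.pyGetD_natCast]
  have hV : PySem.List.pyGetD (PySem.List.pyGetD adj (↑i : ℤ) []) 1 0 = pvV adj i := by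
    simp [pvV, PySem.List.pyGetD_natCast]
  rw [hU, hV]
  have hmem : ∀ w : ℤ, ((↑j : ℤ) ∈ inc.getD w []) ↔ (pvU adj j = w ∨ pvV adj j = w) := by
    intro w
    rw [hinc]
    constructor
    · rintro ⟨k, hk, hjk, h⟩
      have : j = k := Nat.cast_injective hjk
      subst this; exact h
    · intro h; exact ⟨j, hj', rfl, h⟩
  show _ = (if j = i then false else pvShare adj i j)
  by_cases hji : j = i
  · subst hji
    simp
  · rw [if_neg hji]
    rw [Bool.eq_iff_iff]
    simp only [Bool.and_eq_true, Bool.or_eq_true, bne_iff_ne, ne_eq, Nat.cast_inj,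
      List.contains_iff_mem, hmem, pvShare, beq_iff_eq]
    constructor
    · rintro ⟨-, (h | h) | (h | h)⟩ <;> simp [h]
    · intro h
      refine ⟨hji, ?_⟩
      rcases h with ((h | h) | h) | h <;> simp [h]


theorem livingOnTheRoads_common : ∀ (roadRegister : List (List Bool)),
    livingOnTheRoads roadRegister = livingOnTheRoads_alt roadRegister := by
  intro R
  unfold livingOnTheRoads livingOnTheRoads_alt
  simp only [PySem.List.pyRange_zero_natCast, List.foldl_map, List.map_map, Function.comp_def]
  have h0 : List.map (fun _ => List.map (fun _ => false) (List.range (pvBuildAdj R).length))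
      (List.range (pvBuildAdj R).length) = pvMat (pvBuildAdj R).length (fun _ _ => false) := rfl
  rw [h0]
  rw [pvOuterA (pvBuildAdj R) (pvBuildAdj R).length le_rfl]
  rw [pvPhase2B (pvBuildAdj R) _ (pvIncMem (pvBuildAdj R) (pvBuildAdj R).length le_rfl)]
  unfold pvTarget
  refine pvMat_congr (fun i j hi hj => ?_)
  by_cases h : j = i
  · rw [if_neg (by rintro ⟨-, c⟩; exact c h), if_pos h]
  · rw [if_pos ⟨hi, h⟩, if_neg h]

-- ===== VERDICT (by name: the statement is the Claim_ definition above) =====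
theorem livingOnTheRoads_spec : Claim_equal_livingOnTheRoads := by
  intro R _ _
  unfold Spec_livingOnTheRoads
  exact livingOnTheRoads_common R
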